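-- pv_equiv track=rewrite | github.com/candidagenome/cgd-backend | scripts/untested/patmatch/patmatch_to_nrgrep.py | _remove_nested_brackets
-- ===== SOURCE A (Python) =====
-- def _remove_nested_brackets(pattern: str) -> str:
--     """
--     Remove nested brackets and duplicate characters within brackets.
--
--     Examples:
--         TA[A[CT]] -> TA[ACT]
--         TA[ATAG] -> TA[ATG]
--     """
--     result = []
--     bracket_stack = []
--     char_set = set()
--
--     for char in pattern:
--         if char == '[':
--             if not bracket_stack:
--                 result.append(char)
--             bracket_stack.append(char)
--         elif char == ']':
--             bracket_stack.pop()
--             if not bracket_stack: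
--                 result.append(char)
--                 char_set.clear()
--         else:
--             if not bracket_stack:
--                 result.append(char)
--             else:
--                 if char not in char_set:
--                     result.append(char)
--                     char_set.add(char)
--
--     return ''.join(result)
-- ===== SOURCE B (Python) =====
-- def _remove_nested_brackets(pattern: str) -> str:
--     """Depth-counter rewrite: buffer each top-level bracket group, emit it
--     deduped (order-preserving) when the group closes; a stray ']' at depth 0
--     is passed through (A raises IndexError there, outside Pre_)."""
--     result = []
--     depth = 0
--     buffer = []
--     for char in pattern:
--         if char == '[':
--             if depth == 0:
--                 buffer = []
--             depth += 1
--         elif char == ']':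
--             if depth == 0:
--                 result.append(char)
--             else:
--                 depth -= 1
--                 if depth == 0:
--                     result.append('[' + ''.join(dict.fromkeys(buffer)) + ']')
--                     buffer = []
--         else:
--             if depth == 0:
--                 result.append(char)
--             else:
--                 buffer.append(char)
--     if depth > 0:
--         result.append('[' + ''.join(dict.fromkeys(buffer)))
--     return ''.join(result)
-- ===== Notes on version B (the rewrite author's own statement) =====
-- stated objective: alternative
-- what changed: Replaces A's stack of '[' chars plus a live dedup set consulted on every char with an integer depth counter and a per-group buffer whose order-preserving dedup (dict.fromkeys) happens once, when the group closes (or at end of string for an unclosed group).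
import Mathlib
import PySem

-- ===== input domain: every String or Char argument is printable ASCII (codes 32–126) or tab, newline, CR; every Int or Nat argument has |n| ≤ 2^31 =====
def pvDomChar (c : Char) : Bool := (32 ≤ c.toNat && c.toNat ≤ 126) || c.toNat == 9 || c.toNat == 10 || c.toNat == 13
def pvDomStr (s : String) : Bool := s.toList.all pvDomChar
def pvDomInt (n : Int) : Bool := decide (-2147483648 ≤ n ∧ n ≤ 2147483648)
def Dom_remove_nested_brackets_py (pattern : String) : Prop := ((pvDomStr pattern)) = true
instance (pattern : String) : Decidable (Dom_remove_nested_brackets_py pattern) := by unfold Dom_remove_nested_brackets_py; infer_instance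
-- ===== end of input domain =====

-- B rewrites A's stack-of-'['-plus-live-dedup-set pass as a depth counter with a
-- buffered group deduped only at emission time (alternative decomposition, same O(n) cost;
-- return-value equivalence proved on Pre_ = inputs with no unmatched ']', where A raises IndexError).

-- ===== PORT A =====
-- state: (result, bracket_stack, char_set); bracket_stack.pop() on [] raises in Python
-- (excluded by Pre_); here dropLast [] = [] keeps the port total.
def pvAStep (st : List Char × List Char × PySem.Set Char) (c : Char) :
    List Char × List Char × PySem.Set Char :=
  let result := st.1; let stack := st.2.1; let cs := st.2.2
  if c = '[' then
    (if stack = [] then result ++ [c] else result, stack ++ [c], cs)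
  else if c = ']' then
    let stack' := stack.dropLast
    if stack' = [] then (result ++ [c], stack', PySem.Set.empty) else (result, stack', cs)
  else
    if stack = [] then (result ++ [c], stack, cs)
    else if PySem.Set.contains cs c then (result, stack, cs)
    else (result ++ [c], stack, PySem.Set.add cs c)

def remove_nested_brackets_py (pattern : String) : String :=
  let st := pattern.toList.foldl pvAStep ([], [], PySem.Set.empty)
  String.ofList st.1

-- ===== PORT B =====
-- state: (result, depth, buffer); ''.join(dict.fromkeys(buffer)) is PySem.List.dedup.
def pvBStep (st : List Char × Nat × List Char) (c : Char) :
    List Char × Nat × List Char :=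
  let result := st.1; let depth := st.2.1; let buffer := st.2.2
  if c = '[' then (result, depth + 1, if depth = 0 then [] else buffer)
  else if c = ']' then
    if depth = 0 then (result ++ [c], 0, buffer)
    else if depth = 1 then (result ++ '[' :: (PySem.List.dedup buffer ++ [']']), 0, [])
    else (result, depth - 1, buffer)
  else if depth = 0 then (result ++ [c], depth, buffer)
  else (result, depth, buffer ++ [c])

def remove_nested_brackets_py_alt (pattern : String) : String :=
  let st := pattern.toList.foldl pvBStep ([], 0, [])
  String.ofList (if st.2.1 > 0 then st.1 ++ '[' :: PySem.List.dedup st.2.2 else st.1)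

-- ===== PRECONDITION & SPEC =====
-- Pre_ excludes exactly the patterns containing an unmatched ']' (some prefix has more
-- ']' than '['): there Python A raises IndexError (pop from empty list).
def Pre_remove_nested_brackets_py (pattern : String) : Prop :=
  ∀ i ∈ List.range (pattern.toList.length + 1),
    (pattern.toList.take i).count ']' ≤ (pattern.toList.take i).count '['
instance (pattern : String) : Decidable (Pre_remove_nested_brackets_py pattern) := by
  unfold Pre_remove_nested_brackets_py; infer_instance

def pvWitness_remove_nested_brackets_py : String := "TA[A[CT]]"

def Spec_remove_nested_brackets_py (pattern : String) (out : String) : Prop :=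
  out = remove_nested_brackets_py_alt pattern
instance (pattern : String) (out : String) : Decidable (Spec_remove_nested_brackets_py pattern out) := by
  unfold Spec_remove_nested_brackets_py; infer_instance

-- ===== CLAIM (what is proved, stated in full; the proofs are below) =====
def Claim_equal_remove_nested_brackets_py : Prop := ∀ (pattern : String), Dom_remove_nested_brackets_py pattern → Pre_remove_nested_brackets_py pattern → Spec_remove_nested_brackets_py pattern (remove_nested_brackets_py pattern)

-- ===== LEMMAS AND PROOFS =====

-- The simulation relation between A's state and B's state.
def pvRel (a : List Char × List Char × PySem.Set Char) (b : List Char × Nat × List Char) : Prop :=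
  a.2.1 = List.replicate b.2.1 '[' ∧
  a.2.2 = PySem.List.dedup b.2.2 ∧
  (b.2.1 = 0 → b.2.2 = []) ∧
  a.1 = b.1 ++ (if b.2.1 = 0 then [] else '[' :: PySem.List.dedup b.2.2)

lemma pvRel_step (a : List Char × List Char × PySem.Set Char) (b : List Char × Nat × List Char)
    (h : pvRel a b) (c : Char) : pvRel (pvAStep a c) (pvBStep b c) := by
  obtain ⟨ra, sa, cs⟩ := a
  obtain ⟨rb, d, buf⟩ := b
  obtain ⟨hs, hcs, hz, hr⟩ := h
  simp only at hs hcs hz hr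
  subst hs hcs hr
  by_cases hbo : c = '['
  · subst hbo
    cases d with
    | zero =>
      have hb : buf = [] := hz rfl
      subst hb
      simp [pvAStep, pvBStep, pvRel, List.replicate_succ']
    | succ n =>
      simp [pvAStep, pvBStep, pvRel, List.replicate_succ']
  · by_cases hbc : c = ']'
    · subst hbc
      cases d with
      | zero =>
        have hb : buf = [] := hz rfl
        subst hb
        simp [pvAStep, pvBStep, pvRel, PySem.Set.empty]
      | succ n =>
        cases n with
        | zero => simp [pvAStep, pvBStep, pvRel, PySem.Set.empty]
        | succ m =>
          simp [pvAStep, pvBStep, pvRel, List.replicate_succ]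
    · cases d with
      | zero =>
        have hb : buf = [] := hz rfl
        subst hb
        simp [pvAStep, pvBStep, pvRel, hbo, hbc]
      | succ n =>
        by_cases hm : c ∈ buf
        · simp [pvAStep, pvBStep, pvRel, hbo, hbc, hm, List.replicate_succ,
            PySem.Set.ofList_append_singleton, PySem.Set.add_of_mem]
        · simp [pvAStep, pvBStep, pvRel, hbo, hbc, hm, List.replicate_succ,
            PySem.Set.ofList_append_singleton, PySem.Set.add_of_not_mem]

lemma pvRel_foldl (l : List Char) (a : List Char × List Char × PySem.Set Char)
    (b : List Char × Nat × List Char) (h : pvRel a b) :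
    pvRel (l.foldl pvAStep a) (l.foldl pvBStep b) := by
  induction l generalizing a b with
  | nil => exact h
  | cons c t ih => exact ih _ _ (pvRel_step a b h c)

-- ===== VERDICT (by name: the statement is the Claim_ definition above) =====
theorem remove_nested_brackets_py_spec : Claim_equal_remove_nested_brackets_py := by
  intro pattern _ _
  unfold Spec_remove_nested_brackets_py remove_nested_brackets_py remove_nested_brackets_py_alt
  have h := pvRel_foldl pattern.toList ([], [], PySem.Set.empty) ([], 0, [])
    ⟨rfl, rfl, fun _ => rfl, rfl⟩
  obtain ⟨-, -, hz, hr⟩ := h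
  set sa := pattern.toList.foldl pvAStep ([], [], PySem.Set.empty)
  set sb := pattern.toList.foldl pvBStep ([], 0, [])
  by_cases h0 : sb.2.1 = 0
  · simp [hr, h0]
  · simp [hr, h0, Nat.pos_of_ne_zero h0]
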